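-- pv_equiv track=rewrite | github.com/CreateIntelligens/openVman | brain/api/memory/memory_governance.py | _extract_turns
-- ===== SOURCE A (Python) =====
-- def _extract_turns(content: str) -> list[dict[str, str]]:
--     turns: list[dict[str, str]] = []
--     current_user: list[str] = []
--     current_assistant: list[str] = []
--     section: str | None = None
--
--     def _flush_turn() -> None:
--         if current_user or current_assistant:
--             turns.append({"user": " ".join(current_user), "assistant": " ".join(current_assistant)})
--
--     for line in content.splitlines():
--         line = line.strip()
--         if line.startswith("## "):
--             _flush_turn()
--             current_user.clear()
--             current_assistant.clear()
--             section = None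
--         elif line == "### User":
--             section = "user"
--         elif line == "### Assistant":
--             section = "assistant"
--         elif line:
--             if section == "user":
--                 current_user.append(line)
--             elif section == "assistant":
--                 current_assistant.append(line)
--
--     _flush_turn()
--     return turns
-- ===== SOURCE B (Python) =====
-- def _extract_turns(content: str) -> list[dict[str, str]]:
--     # Group lines into blocks separated by '## ' headers, then parse each block.
--     blocks: list[list[str]] = []
--     cur: list[str] = []
--     for line in content.splitlines():
--         s = line.strip()
--         if s.startswith("## "):
--             blocks.append(cur)
--             cur = []
--         else:
--             cur.append(s)
--     blocks.append(cur)
--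
--     turns: list[dict[str, str]] = []
--     for block in blocks:
--         user: list[str] = []
--         assistant: list[str] = []
--         section: str | None = None
--         for s in block:
--             if s == "### User":
--                 section = "user"
--             elif s == "### Assistant":
--                 section = "assistant"
--             elif s:
--                 if section == "user":
--                     user.append(s)
--                 elif section == "assistant":
--                     assistant.append(s)
--         if user or assistant:
--             turns.append({"user": " ".join(user), "assistant": " ".join(assistant)})
--     return turns
-- ===== Notes on version B (the rewrite author's own statement) =====
-- stated objective: alternative
-- what changed: Replaces A's flat flush-on-boundary state machine with a two-phase group-then-parse decomposition: first split the lines into blocks at turn-header lines, then parse each block independently with a fresh section flag and emit its turn.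
import Mathlib
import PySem

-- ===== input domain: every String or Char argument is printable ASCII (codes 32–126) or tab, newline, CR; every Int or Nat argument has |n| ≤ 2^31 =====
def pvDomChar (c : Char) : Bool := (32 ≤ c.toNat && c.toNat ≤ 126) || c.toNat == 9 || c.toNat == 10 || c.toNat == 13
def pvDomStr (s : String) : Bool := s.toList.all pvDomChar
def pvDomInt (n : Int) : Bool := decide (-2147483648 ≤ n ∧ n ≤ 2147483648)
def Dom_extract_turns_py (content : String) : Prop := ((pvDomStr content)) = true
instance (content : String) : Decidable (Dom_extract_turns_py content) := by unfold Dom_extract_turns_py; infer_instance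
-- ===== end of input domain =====

-- B replaces A's flat flush-on-boundary state machine with a group-then-parse decomposition
-- (split the lines into header-delimited blocks, then parse each block with a fresh section flag); same cost.

-- ===== PORT A =====
-- _flush_turn
def pvFlushA (turns : List (List (String × String))) (cu ca : List String) :
    List (List (String × String)) :=
  if cu ≠ [] ∨ ca ≠ [] then
    turns ++ [[("user", PySem.Str.join " " cu), ("assistant", PySem.Str.join " " ca)]]
  else turns

-- one iteration of A's for-loop over (turns, current_user, current_assistant, section)
def pvStepA (st : List (List (String × String)) × List String × List String × Option String)
    (line : String) :
    List (List (String × String)) × List String × List String × Option String :=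
  let (turns, cu, ca, sec) := st
  let l := PySem.Str.strip line
  if PySem.Str.startswith l "## " then (pvFlushA turns cu ca, [], [], none)
  else if l = "### User" then (turns, cu, ca, some "user")
  else if l = "### Assistant" then (turns, cu, ca, some "assistant")
  else if l ≠ "" then
    if sec = some "user" then (turns, cu ++ [l], ca, sec)
    else if sec = some "assistant" then (turns, cu, ca ++ [l], sec)
    else (turns, cu, ca, sec)
  else (turns, cu, ca, sec)

def extract_turns_py (content : String) : List (List (String × String)) :=
  let fin := (PySem.Str.splitlines content).foldl pvStepA ([], [], [], none)
  pvFlushA fin.1 fin.2.1 fin.2.2.1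

-- ===== PORT B =====
-- splitter loop: (blocks, cur) over raw lines
def pvSplitStep (st : List (List String) × List String) (line : String) :
    List (List String) × List String :=
  let s := PySem.Str.strip line
  if PySem.Str.startswith s "## " then (st.1 ++ [st.2], [])
  else (st.1, st.2 ++ [s])

def pvBlocks (lines : List String) : List (List String) :=
  let fin := lines.foldl pvSplitStep ([], [])
  fin.1 ++ [fin.2]

-- one iteration of B's inner per-block loop over (user, assistant, section)
def pvParseStep (st : List String × List String × Option String) (s : String) :
    List String × List String × Option String :=
  let (u, a, sec) := st
  if s = "### User" then (u, a, some "user")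
  else if s = "### Assistant" then (u, a, some "assistant")
  else if s ≠ "" then
    if sec = some "user" then (u ++ [s], a, sec)
    else if sec = some "assistant" then (u, a ++ [s], sec)
    else (u, a, sec)
  else (u, a, sec)

def pvEmit (turns : List (List (String × String))) (b : List String) :
    List (List (String × String)) :=
  let p := b.foldl pvParseStep ([], [], none)
  if p.1 ≠ [] ∨ p.2.1 ≠ [] then
    turns ++ [[("user", PySem.Str.join " " p.1), ("assistant", PySem.Str.join " " p.2.1)]]
  else turns

def extract_turns_py_alt (content : String) : List (List (String × String)) :=
  (pvBlocks (PySem.Str.splitlines content)).foldl pvEmit []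

-- ===== PRECONDITION & SPEC =====
def Spec_extract_turns_py (content : String) (out : List (List (String × String))) : Prop := out = extract_turns_py_alt content
instance (content : String) (out : List (List (String × String))) : Decidable (Spec_extract_turns_py content out) := by unfold Spec_extract_turns_py; infer_instance

-- ===== CLAIM (what is proved, stated in full; the proofs are below) =====
def Claim_equal_extract_turns_py : Prop := ∀ (content : String), Dom_extract_turns_py content → Spec_extract_turns_py content (extract_turns_py content)

-- ===== LEMMAS AND PROOFS =====

-- proof-side: A's loop written as structural recursion over the remaining lines
def pvRunA (turns : List (List (String × String))) (cu ca : List String)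
    (sec : Option String) : List String → List (List (String × String))
  | [] => pvFlushA turns cu ca
  | l :: ls =>
    let s := PySem.Str.strip l
    if PySem.Str.startswith s "## " then pvRunA (pvFlushA turns cu ca) [] [] none ls
    else
      let st := pvParseStep (cu, ca, sec) s
      pvRunA turns st.1 st.2.1 st.2.2 ls

-- proof-side: blocks as structural recursion with an accumulator for the current block
def pvBlocksFrom (cur : List String) : List String → List (List String)
  | [] => [cur]
  | l :: ls =>
    let s := PySem.Str.strip l
    if PySem.Str.startswith s "## " then cur :: pvBlocksFrom [] ls
    else pvBlocksFrom (cur ++ [s]) ls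

-- proof-side: B's outer loop with the first block's parse continued from state st
def pvRunBlocks (turns : List (List (String × String)))
    (st : List String × List String × Option String) :
    List (List String) → List (List (String × String))
  | [] => turns
  | b :: bs =>
    let p := b.foldl pvParseStep st
    pvRunBlocks (pvFlushA turns p.1 p.2.1) ([], [], none) bs

theorem pvFoldA_eq_runA (lines : List String) (turns : List (List (String × String)))
    (cu ca : List String) (sec : Option String) :
    (let fin := lines.foldl pvStepA (turns, cu, ca, sec)
     pvFlushA fin.1 fin.2.1 fin.2.2.1) = pvRunA turns cu ca sec lines := by
  induction lines generalizing turns cu ca sec with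
  | nil => rfl
  | cons l ls ih =>
    simp only [List.foldl_cons, pvRunA, pvStepA, pvParseStep]
    split_ifs <;> simp_all

theorem pvBlocksFrom_shift (ls : List String) (cur : List String) (turns : List (List (String × String)))
    (st : List String × List String × Option String) :
    pvRunBlocks turns st (pvBlocksFrom cur ls)
      = pvRunBlocks turns (cur.foldl pvParseStep st) (pvBlocksFrom [] ls) := by
  induction ls generalizing cur st turns with
  | nil => simp [pvBlocksFrom, pvRunBlocks]
  | cons l ls ih =>
    simp only [pvBlocksFrom, List.nil_append]
    split_ifs with h
    · simp [pvRunBlocks]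
    · rw [ih (cur ++ [PySem.Str.strip l]), ih [PySem.Str.strip l]]
      simp [List.foldl_append]

theorem pvRunA_eq_runBlocks (lines : List String) (turns : List (List (String × String)))
    (cu ca : List String) (sec : Option String) :
    pvRunA turns cu ca sec lines = pvRunBlocks turns (cu, ca, sec) (pvBlocksFrom [] lines) := by
  induction lines generalizing turns cu ca sec with
  | nil => simp [pvRunA, pvBlocksFrom, pvRunBlocks]
  | cons l ls ih =>
    simp only [pvRunA]
    split_ifs with h
    · rw [show pvBlocksFrom [] (l :: ls) = [] :: pvBlocksFrom [] ls from by
        simp only [pvBlocksFrom]; rw [if_pos h]]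
      simp [pvRunBlocks, ih]
    · rw [ih, show pvBlocksFrom [] (l :: ls) = pvBlocksFrom [PySem.Str.strip l] ls from by
        simp only [pvBlocksFrom]; rw [if_neg h];rfl, pvBlocksFrom_shift ls [PySem.Str.strip l]]
      simp

theorem pvSplit_eq_blocksFrom (lines : List String) (bs : List (List String)) (cur : List String) :
    (let fin := lines.foldl pvSplitStep (bs, cur); fin.1 ++ [fin.2]) = bs ++ pvBlocksFrom cur lines := by
  induction lines generalizing bs cur with
  | nil => simp [pvBlocksFrom]
  | cons l ls ih =>
    simp only [List.foldl_cons, pvSplitStep, pvBlocksFrom]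
    split_ifs with h <;> simp [ih]

theorem pvFoldEmit_eq_runBlocks (bs : List (List String)) (turns : List (List (String × String))) :
    bs.foldl pvEmit turns = pvRunBlocks turns ([], [], none) bs := by
  induction bs generalizing turns with
  | nil => rfl
  | cons b bs ih => simp [pvEmit, pvRunBlocks, pvFlushA, ih]

-- ===== VERDICT (by name: the statement is the Claim_ definition above) =====
theorem extract_turns_py_spec : Claim_equal_extract_turns_py := by
  intro content _
  unfold Spec_extract_turns_py extract_turns_py extract_turns_py_alt pvBlocks
  rw [pvFoldA_eq_runA, pvSplit_eq_blocksFrom, pvFoldEmit_eq_runBlocks,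
    pvRunA_eq_runBlocks]
  rfl
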